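-- pv_equiv track=rewrite | github.com/kengoharimoto/find_similar_strings | find_similar_strings.py | build_alpha_view
-- ===== SOURCE A (Python) =====
-- from typing import Dict, List, Optional, Tuple
--
-- def build_alpha_view(text: str) -> Tuple[str, List[int]]:
--     """
--     Build a letter-only (Unicode isalpha) view of `text`.
--
--     Returns:
--         alpha_text: string containing only alphabetic characters
--         alpha_to_char: list mapping alpha index -> original char index in `text`
--     """
--     alpha_chars: List[str] = []
--     alpha_to_char: List[int] = []
--     for idx, ch in enumerate(text):
--         if ch.isalpha():
--             alpha_chars.append(ch)
--             alpha_to_char.append(idx)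
--     return "".join(alpha_chars), alpha_to_char
-- ===== SOURCE B (Python) =====
-- from typing import List, Tuple
--
-- def build_alpha_view(text: str) -> Tuple[str, List[int]]:
--     # Divide and conquer: split the index interval in half, solve each half
--     # recursively, concatenate the results (with indices already absolute).
--     def go(lo: int, hi: int) -> Tuple[str, List[int]]:
--         if hi - lo == 0:
--             return "", []
--         if hi - lo == 1:
--             ch = text[lo]
--             if ch.isalpha():
--                 return ch, [lo]
--             return "", []
--         mid = lo + (hi - lo) // 2
--         sl, il = go(lo, mid)
--         sr, ir = go(mid, hi)
--         return sl + sr, il + ir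
--     return go(0, len(text))
-- ===== Notes on version B (the rewrite author's own statement) =====
-- stated objective: alternative
-- what changed: A filters in a single left-to-right loop accumulating both lists; B is a divide-and-conquer recursion that halves the index interval, solves each half independently and concatenates the two sub-results.
import Mathlib
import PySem

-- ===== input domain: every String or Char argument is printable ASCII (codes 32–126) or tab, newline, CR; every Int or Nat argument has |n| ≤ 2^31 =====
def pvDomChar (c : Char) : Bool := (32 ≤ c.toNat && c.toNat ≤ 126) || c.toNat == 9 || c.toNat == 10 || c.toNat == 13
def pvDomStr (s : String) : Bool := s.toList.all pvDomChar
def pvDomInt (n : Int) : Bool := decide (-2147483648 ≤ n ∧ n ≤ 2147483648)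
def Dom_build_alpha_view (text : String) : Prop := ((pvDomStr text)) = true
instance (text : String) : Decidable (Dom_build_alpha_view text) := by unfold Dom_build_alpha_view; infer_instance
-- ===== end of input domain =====

-- B replaces A's single left-to-right filtering loop with a divide-and-conquer recursion
-- on the index interval, concatenating sub-results (objective: alternative).


-- ===== PORT A =====
def build_alpha_view (text : String) : String × List Int :=
  let st := (PySem.List.enumerate text.toList 0).foldl
    (fun (acc : List Char × List Int) p =>
      if PySem.Chars.isalpha p.2 then (acc.1 ++ [p.2], acc.2 ++ [p.1]) else acc)
    ([], [])
  (String.ofList st.1, st.2)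

-- ===== PORT B =====
-- text[lo] is ported as pyGetD with a default; exact here because 0 ≤ lo < len(text)
-- in every reachable call.  The structural fuel parameter only makes the recursion
-- total: it starts at (hi - lo).toNat and never runs out on reachable calls, since
-- each half of an interval of length d ≥ 2 has length ≤ d - 1.
def bavGo (fuel : Nat) (cs : List Char) (lo hi : Int) : String × List Int :=
  match fuel with
  | 0 => ("", [])
  | f + 1 =>
    if hi - lo = 0 then ("", [])
    else if hi - lo = 1 then
      let ch := PySem.List.pyGetD cs lo ' '
      if PySem.Chars.isalpha ch then (String.ofList [ch], [lo]) else ("", [])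
    else
      let mid := lo + PySem.Int.floordiv (hi - lo) 2
      let l := bavGo f cs lo mid
      let r := bavGo f cs mid hi
      (l.1 ++ r.1, l.2 ++ r.2)

def build_alpha_view_alt (text : String) : String × List Int :=
  bavGo (PySem.Str.len text).toNat text.toList 0 (PySem.Str.len text)

-- ===== PRECONDITION & SPEC =====
def Spec_build_alpha_view (text : String) (out : String × List Int) : Prop := out = build_alpha_view_alt text
instance (text : String) (out : String × List Int) : Decidable (Spec_build_alpha_view text out) := by unfold Spec_build_alpha_view; infer_instance

-- ===== CLAIM =====
def Claim_equal_build_alpha_view : Prop := ∀ (text : String), Dom_build_alpha_view text → Spec_build_alpha_view text (build_alpha_view text)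

-- ===== LEMMAS AND PROOFS =====

/-- A's loop appends, per element passing the filter, its char to the first and its index
to the second accumulator. -/
theorem bav_foldA (l : List (Int × Char)) (a : List Char) (b : List Int) :
    l.foldl
      (fun (acc : List Char × List Int) p =>
        if PySem.Chars.isalpha p.2 then (acc.1 ++ [p.2], acc.2 ++ [p.1]) else acc)
      (a, b)
    = (a ++ (l.filter (fun p => PySem.Chars.isalpha p.2)).map (·.2),
       b ++ (l.filter (fun p => PySem.Chars.isalpha p.2)).map (·.1)) := by
  induction l generalizing a b with
  | nil => simp
  | cons p l ih =>
    by_cases h : PySem.Chars.isalpha p.2 <;> simp [h, ih]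

/-- With enough fuel, B's recursion computes the filtered view of the index range [lo, hi). -/
theorem bavGo_eq (fuel : Nat) (cs : List Char) (lo hi : Int) (hlo : lo ≤ hi)
    (hf : (hi - lo).toNat ≤ fuel) :
    bavGo fuel cs lo hi =
      (String.ofList (((PySem.List.pyRange lo hi 1).filter
          (fun j => PySem.Chars.isalpha (PySem.List.pyGetD cs j ' '))).map
          (fun j => PySem.List.pyGetD cs j ' ')),
       (PySem.List.pyRange lo hi 1).filter
          (fun j => PySem.Chars.isalpha (PySem.List.pyGetD cs j ' '))) := by
  induction fuel generalizing lo hi with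
  | zero =>
    have : hi = lo := by omega
    subst this
    simp [bavGo, PySem.List.pyRange_one_eq_nil le_rfl]
  | succ f ih =>
    rw [bavGo]
    by_cases h0 : hi - lo = 0
    · simp [h0, PySem.List.pyRange_one_eq_nil (by omega : hi ≤ lo)]
    · simp only [h0, if_false]
      by_cases h1 : hi - lo = 1
      · have : hi = lo + 1 := by omega
        subst this
        simp only [h1, if_true]
        rw [PySem.List.pyRange_one_singleton]
        by_cases ha : PySem.Chars.isalpha (PySem.List.pyGetD cs lo ' ') <;>
          simp [ha, List.filter]
      · simp only [h1, if_false]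
        have hd : PySem.Int.floordiv (hi - lo) 2 = (hi - lo) / 2 :=
          PySem.Int.floordiv_eq_ediv_of_pos (by omega)
        have hmid1 : lo ≤ lo + PySem.Int.floordiv (hi - lo) 2 := by rw [hd]; omega
        have hmid2 : lo + PySem.Int.floordiv (hi - lo) 2 ≤ hi := by rw [hd]; omega
        rw [ih lo _ hmid1 (by rw [hd]; omega), ih _ hi hmid2 (by rw [hd]; omega),
          PySem.List.pyRange_one_append lo (lo + PySem.Int.floordiv (hi - lo) 2) hi hmid1 hmid2,
          List.filter_append, List.map_append]
        simp

-- ===== VERDICT =====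
theorem build_alpha_view_spec : Claim_equal_build_alpha_view := by
  intro text _
  unfold Spec_build_alpha_view build_alpha_view build_alpha_view_alt
  rw [bavGo_eq _ text.toList 0 (PySem.Str.len text)
    (by rw [PySem.Str.len_eq]; exact_mod_cast Nat.zero_le _) (by omega)]
  rw [bav_foldA]
  rw [PySem.List.enumerate_eq_map_pyRange text.toList ' ', PySem.Str.len_eq]
  simp [List.filter_map, List.map_map, Function.comp_def]
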